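-- pv_equiv track=rewrite | github.com/kawtarlabzae/Adaptive-GraphRAG-for-Multi-Agent-Systems | Application/backend/agents/research_agent.py | _nodes_for_anomaly
-- ===== SOURCE A (Python) =====
-- from typing import Dict, List, Optional, Any
--
-- def _nodes_for_anomaly(anomaly: Optional[str], all_nodes: List[Dict]) -> List[Dict]:
--     kw_map = {
--         "turbulence":     ["turbulence", "sfc", "fuel", "drag"],
--         "isa_deviation":  ["oat", "isa", "temperature", "sfc", "density"],
--         "jet_stream_loss":["jet_stream", "wind", "ground_speed", "fuel"],
--         "mach_divergence":["mach", "drag", "wave_drag", "divergence"],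
--     }
--     keywords = kw_map.get(anomaly or "", ["fuel", "sfc"])
--     scored = []
--     for n in all_nodes:
--         score = sum(1 for kw in keywords
--                     if kw in n.get("id", "").lower() or kw in n.get("label", "").lower())
--         if score:
--             scored.append((score, n))
--     scored.sort(key=lambda x: x[0], reverse=True)
--     return [n for _, n in scored[:6]]
-- ===== SOURCE B (Python) =====
-- from typing import Dict, List, Optional, Any
--
-- def _nodes_for_anomaly(anomaly: Optional[str], all_nodes: List[Dict]) -> List[Dict]:
--     kw_map = {
--         "turbulence":     ["turbulence", "sfc", "fuel", "drag"],
--         "isa_deviation":  ["oat", "isa", "temperature", "sfc", "density"],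
--         "jet_stream_loss":["jet_stream", "wind", "ground_speed", "fuel"],
--         "mach_divergence":["mach", "drag", "wave_drag", "divergence"],
--     }
--     keywords = kw_map.get(anomaly or "", ["fuel", "sfc"])
--     # bucket sort over the tiny score range instead of collecting + sorting
--     buckets = [[] for _ in range(len(keywords) + 1)]
--     for n in all_nodes:
--         idl = n.get("id", "").lower()
--         lbl = n.get("label", "").lower()
--         score = sum(kw in idl or kw in lbl for kw in keywords)
--         if score:
--             buckets[score].append(n)
--     out = []
--     for score in range(len(keywords), 0, -1):
--         for n in buckets[score]:
--             if len(out) == 6: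
--                 return out
--             out.append(n)
--     return out
-- ===== Notes on version B (the rewrite author's own statement) =====
-- stated objective: alternative
-- what changed: Replaces collect-then-stable-reverse-sort with a single-pass bucket (counting) sort over the bounded score range 1..len(keywords), emitting buckets from highest score down and stopping at 6 nodes.
import Mathlib
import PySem

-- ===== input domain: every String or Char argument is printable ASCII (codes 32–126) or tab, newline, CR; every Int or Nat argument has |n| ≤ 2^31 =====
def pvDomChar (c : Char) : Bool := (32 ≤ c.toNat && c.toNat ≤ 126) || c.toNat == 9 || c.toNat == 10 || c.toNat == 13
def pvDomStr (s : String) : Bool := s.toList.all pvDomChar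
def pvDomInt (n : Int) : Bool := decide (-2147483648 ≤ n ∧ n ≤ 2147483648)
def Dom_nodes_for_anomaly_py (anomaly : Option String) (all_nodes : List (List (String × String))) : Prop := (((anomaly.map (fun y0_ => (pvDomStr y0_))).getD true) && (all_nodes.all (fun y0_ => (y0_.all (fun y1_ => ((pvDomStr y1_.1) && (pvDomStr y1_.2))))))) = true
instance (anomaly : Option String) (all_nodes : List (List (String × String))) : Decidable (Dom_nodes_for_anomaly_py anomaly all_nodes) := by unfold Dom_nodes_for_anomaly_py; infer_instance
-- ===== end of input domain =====

-- B replaces collect-then-stable-reverse-sort with a one-pass bucket sort over the bounded score range (same results, alternative algorithm).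


-- ===== PORT A =====
-- the kw_map literal (identical in both Pythons)
def pvKwMap : PySem.Dict String (List String) :=
  PySem.Dict.ofList
    [("turbulence",      ["turbulence", "sfc", "fuel", "drag"]),
     ("isa_deviation",   ["oat", "isa", "temperature", "sfc", "density"]),
     ("jet_stream_loss", ["jet_stream", "wind", "ground_speed", "fuel"]),
     ("mach_divergence", ["mach", "drag", "wave_drag", "divergence"])]

-- 'kw in n.get("id", "").lower() or kw in n.get("label", "").lower()'
def pvHitA (n : List (String × String)) (kw : String) : Bool :=
  PySem.Str.isIn kw (PySem.Str.lower ((PySem.Dict.mk n).getD "id" "")) ||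
  PySem.Str.isIn kw (PySem.Str.lower ((PySem.Dict.mk n).getD "label" ""))

def nodes_for_anomaly_py (anomaly : Option String) (all_nodes : List (List (String × String))) : List (List (String × String)) :=
  let keywords := pvKwMap.getD (anomaly.getD "") ["fuel", "sfc"]
  let scored := all_nodes.foldl (fun acc n =>
      let score : Int := (keywords.map (fun kw => if pvHitA n kw then (1 : Int) else 0)).sum
      if score ≠ 0 then acc ++ [(score, n)] else acc) []
  let scored := PySem.List.sorted scored (fun x => x.1) true
  (PySem.List.slice scored none (some 6)).map (fun x => x.2)

-- ===== PORT B =====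
-- 'score = sum(kw in idl or kw in lbl for kw in keywords)' (booleans summed = count)
def pvScoreB (keywords : List String) (n : List (String × String)) : Nat :=
  let idl := PySem.Str.lower ((PySem.Dict.mk n).getD "id" "")
  let lbl := PySem.Str.lower ((PySem.Dict.mk n).getD "label" "")
  keywords.countP (fun kw => PySem.Str.isIn kw idl || PySem.Str.isIn kw lbl)

def nodes_for_anomaly_py_alt (anomaly : Option String) (all_nodes : List (List (String × String))) : List (List (String × String)) :=
  let keywords := pvKwMap.getD (anomaly.getD "") ["fuel", "sfc"]
  let buckets0 : List (List (List (String × String))) :=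
    (List.range (keywords.length + 1)).map (fun _ => [])
  let buckets := all_nodes.foldl (fun b n =>
      let score := pvScoreB keywords n
      if score ≠ 0 then b.set score (b.getD score [] ++ [n]) else b) buckets0
  (PySem.List.pyRange (keywords.length : Int) 0 (-1)).foldl (fun out k =>
      (buckets.getD k.toNat []).foldl (fun out n =>
          if out.length = 6 then out else out ++ [n]) out) []

-- ===== PRECONDITION & SPEC =====
def Spec_nodes_for_anomaly_py (anomaly : Option String) (all_nodes : List (List (String × String))) (out : List (List (String × String))) : Prop := out = nodes_for_anomaly_py_alt anomaly all_nodes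
instance (anomaly : Option String) (all_nodes : List (List (String × String))) (out : List (List (String × String))) : Decidable (Spec_nodes_for_anomaly_py anomaly all_nodes out) := by unfold Spec_nodes_for_anomaly_py; infer_instance

-- ===== CLAIM (what is proved, stated in full; the proofs are below) =====
def Claim_equal_nodes_for_anomaly_py : Prop := ∀ (anomaly : Option String) (all_nodes : List (List (String × String))), Dom_nodes_for_anomaly_py anomaly all_nodes → Spec_nodes_for_anomaly_py anomaly all_nodes (nodes_for_anomaly_py anomaly all_nodes)

-- ===== LEMMAS AND PROOFS =====

-- A's per-node score as an Int equals B's count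
lemma pv_score_eq (kws : List String) (n : List (String × String)) :
    ((kws.map (fun kw => if pvHitA n kw then (1 : Int) else 0)).sum) = (pvScoreB kws n : Int) := by
  rw [PySem.List.sum_map_ite_one_zero]
  rfl

-- range(K, 0, -1) is [K, K-1, ..., 1]
lemma pv_pyRange_down (K : Nat) :
    PySem.List.pyRange (K : Int) 0 (-1) = (List.range K).map (fun (k : Nat) => (K : Int) - (k : Int)) := by
  unfold PySem.List.pyRange
  norm_num
  rcases Nat.eq_zero_or_pos K with h | h
  · subst h; norm_num
  · rw [if_pos h]
    refine List.map_congr_left ?_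
    intro k _; ring

lemma pv_mem_down (K : Nat) (j : Int) :
    j ∈ (List.range K).map (fun (k : Nat) => (K : Int) - (k : Int)) ↔ 1 ≤ j ∧ j ≤ (K : Int) := by
  simp only [List.mem_map, List.mem_range]
  constructor
  · rintro ⟨k, hk, rfl⟩; omega
  · intro ⟨h1, h2⟩; exact ⟨(K - j).toNat, by omega, by omega⟩

lemma pv_pairwise_down (K : Nat) :
    ((List.range K).map (fun (k : Nat) => (K : Int) - (k : Int))).Pairwise (· > ·) := by
  refine List.Pairwise.map _ ?_ List.pairwise_lt_range
  intro a b h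
  simp only [gt_iff_lt]
  omega

theorem pv_insertBy_mid {N : Type} (x : Int × N) (L1 L2 : List (Int × N))
    (h1 : ∀ y ∈ L1, x.1 ≤ y.1) (h2 : ∀ y ∈ L2, y.1 < x.1) :
    PySem.List.insertBy (fun a b => decide (b.1 < a.1)) x (L1 ++ L2) = L1 ++ x :: L2 := by
  induction L1 with
  | nil =>
    cases L2 with
    | nil => rfl
    | cons y ys =>
      have : y.1 < x.1 := h2 y (by simp)
      simp [PySem.List.insertBy, this]
  | cons y L1 ih =>
    have hy : ¬ (y.1 < x.1) := not_lt.mpr (h1 y (by simp))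
    simp only [List.cons_append, PySem.List.insertBy, decide_eq_true_eq, if_neg hy]
    rw [ih (fun z hz => h1 z (by simp [hz]))]
theorem pv_sorted_buckets {N : Type} (s : List (Int × N)) (ds : List Int)
    (hds : ds.Pairwise (· > ·)) (hmem : ∀ p ∈ s, p.1 ∈ ds) :
    PySem.List.sorted s (fun p => p.1) true = ds.flatMap (fun j => s.filter (fun p => p.1 == j)) := by
  rw [PySem.List.sorted_rev_eq_foldl_insertBy]
  induction s using List.reverseRecOn with
  | nil => simp
  | append_singleton s x ih =>
    rw [List.foldl_append, List.foldl_cons, List.foldl_nil,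
        ih (fun p hp => hmem p (by simp [hp]))]
    obtain ⟨d1, d2, rfl⟩ := List.append_of_mem (hmem x (by simp))
    rw [List.pairwise_append] at hds
    obtain ⟨hp1, hp2, hcross⟩ := hds
    have hd2 : ∀ j ∈ d2, j < x.1 := fun j hj => (List.pairwise_cons.mp hp2).1 j hj
    have hd1 : ∀ j ∈ d1, x.1 < j := fun j hj => hcross j hj x.1 (by simp)
    have step : List.flatMap (fun j => List.filter (fun p => p.1 == j) s) (d1 ++ x.1 :: d2)
        = (List.flatMap (fun j => List.filter (fun p => p.1 == j) s) d1
            ++ List.filter (fun p => p.1 == x.1) s)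
          ++ List.flatMap (fun j => List.filter (fun p => p.1 == j) s) d2 := by
      simp [List.flatMap_append]
    rw [step, pv_insertBy_mid]
    · -- reassemble: L1 ++ x :: L2 = flatMap over (s ++ [x])
      have hfilter : ∀ j : Int, List.filter (fun p => p.1 == j) (s ++ [x])
          = List.filter (fun p => p.1 == j) s ++ (if x.1 == j then [x] else []) := by
        intro j; simp [List.filter_append]; split <;> simp_all
      have e1 : List.flatMap (fun j => List.filter (fun p => p.1 == j) (s ++ [x])) d1
          = List.flatMap (fun j => List.filter (fun p => p.1 == j) s) d1 :=
        List.flatMap_congr (fun j hj => by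
          rw [hfilter j, if_neg (by have := hd1 j hj; simp; omega)]; simp)
      have e2 : List.flatMap (fun j => List.filter (fun p => p.1 == j) (s ++ [x])) d2
          = List.flatMap (fun j => List.filter (fun p => p.1 == j) s) d2 :=
        List.flatMap_congr (fun j hj => by
          rw [hfilter j, if_neg (by have := hd2 j hj; simp; omega)]; simp)
      rw [List.flatMap_append]
      simp only [List.flatMap_cons]
      rw [e1, e2, hfilter x.1, if_pos (by simp)]
      simp
    · intro y hy
      rcases List.mem_append.mp hy with hy | hy
      · obtain ⟨j, hj, hyf⟩ := List.mem_flatMap.mp hy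
        have := List.of_mem_filter hyf
        have : y.1 = j := by simpa using this
        have := hd1 j hj; omega
      · have := List.of_mem_filter hy
        simp at this; omega
    · intro y hy
      obtain ⟨j, hj, hyf⟩ := List.mem_flatMap.mp hy
      have hyj : y.1 = j := by simpa using List.of_mem_filter hyf
      have := hd2 j hj; omega


theorem pv_build_inv (kws : List String) (nodes : List (List (String × String))) :
    ∀ (b : List (List (List (String × String)))), b.length = kws.length + 1 →
    (nodes.foldl (fun b n =>
        let score := pvScoreB kws n
        if score ≠ 0 then b.set score (b.getD score [] ++ [n]) else b) b).length = kws.length + 1 ∧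
    ∀ j : Nat, 1 ≤ j → j ≤ kws.length →
      (nodes.foldl (fun b n =>
          let score := pvScoreB kws n
          if score ≠ 0 then b.set score (b.getD score [] ++ [n]) else b) b).getD j [] =
        b.getD j [] ++ nodes.filter (fun n => pvScoreB kws n == j) := by
  induction nodes with
  | nil => intro b hb; exact ⟨hb, fun j _ _ => by simp⟩
  | cons n nodes ih =>
    intro b hb
    simp only [List.foldl_cons]
    by_cases hc : pvScoreB kws n ≠ 0
    · have hlt : pvScoreB kws n < b.length := by
        have := List.countP_le_length (l := kws)
          (p := fun kw => PySem.Str.isIn kw (PySem.Str.lower ((PySem.Dict.mk n).getD "id" ""))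
            || PySem.Str.isIn kw (PySem.Str.lower ((PySem.Dict.mk n).getD "label" "")))
        simp only [pvScoreB]; omega
      have hb' : (b.set (pvScoreB kws n) (b.getD (pvScoreB kws n) [] ++ [n])).length = kws.length + 1 := by
        simp [hb]
      obtain ⟨hl, hg⟩ := ih _ hb'
      rw [if_pos hc]
      refine ⟨hl, fun j h1 h2 => ?_⟩
      rw [hg j h1 h2]
      by_cases hj : pvScoreB kws n = j
      · subst hj
        rw [List.filter_cons_of_pos (by simp)]
        simp only [List.getD_eq_getElem?_getD, List.getElem?_set_self hlt]
        simp
      · rw [List.filter_cons_of_neg (by simp [hj])]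
        simp only [List.getD_eq_getElem?_getD, List.getElem?_set_ne hj]
    · rw [Classical.not_not] at hc
      rw [if_neg (by simp [hc])]
      obtain ⟨hl, hg⟩ := ih _ hb
      refine ⟨hl, fun j h1 h2 => ?_⟩
      rw [hg j h1 h2, List.filter_cons_of_neg (by simp [hc]; omega)]

theorem pv_trunc_fold {N : Type} (l : List N) : ∀ (out : List N), out.length ≤ 6 →
    l.foldl (fun acc n => if acc.length = 6 then acc else acc ++ [n]) out = (out ++ l).take 6 := by
  induction l with
  | nil => intro out h; simp [List.take_of_length_le h]
  | cons n l ih =>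
    intro out h
    simp only [List.foldl_cons]
    by_cases h6 : out.length = 6
    · rw [if_pos h6, ih out h, List.take_append, List.take_append,
        List.take_of_length_le (le_of_eq h6), h6]
      simp
    · rw [if_neg h6, ih (out ++ [n]) (by simp; omega)]
      simp

theorem pv_take_append_take {N : Type} (a b : List N) :
    ((a.take 6) ++ b).take 6 = (a ++ b).take 6 := by
  by_cases h : a.length ≤ 6
  · rw [List.take_of_length_le h]
  · rw [List.take_append, List.take_append, List.take_take]
    have e1 : (6 : Nat) - a.length = 0 := by omega
    have e2 : (6 : Nat) - (a.take 6).length = 0 := by simp [List.length_take]; omega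
    rw [e1, e2]
    simp

theorem pv_outer_fold {N : Type} (g : Int → List N) (ds : List Int) :
    ∀ (out : List N), out.length ≤ 6 →
    ds.foldl (fun out k => (g k).foldl (fun out n => if out.length = 6 then out else out ++ [n]) out) out =
      (out ++ ds.flatMap g).take 6 := by
  induction ds with
  | nil => intro out h; simp [List.take_of_length_le h]
  | cons k ds ih =>
    intro out h
    simp only [List.foldl_cons]
    rw [pv_trunc_fold _ _ h, ih _ (by simp [List.length_take]),
      List.flatMap_cons, ← List.append_assoc, pv_take_append_take]


-- A's collecting loop in closed form
lemma pv_afold (kws : List String) (nodes : List (List (String × String))) :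
    ∀ acc, nodes.foldl (fun acc n =>
        let score : Int := (kws.map (fun kw => if pvHitA n kw then (1 : Int) else 0)).sum
        if score ≠ 0 then acc ++ [(score, n)] else acc) acc =
      acc ++ (nodes.filter (fun n => pvScoreB kws n != 0)).map
        (fun n => ((pvScoreB kws n : Int), n)) := by
  induction nodes with
  | nil => intro acc; simp
  | cons n nodes ih =>
    intro acc
    simp only [List.foldl_cons]
    rw [pv_score_eq kws n]
    by_cases hc : pvScoreB kws n = 0
    · rw [if_neg (by simp [hc]), ih, List.filter_cons_of_neg (by simp [hc])]
    · rw [if_pos (by simp [hc]), ih, List.filter_cons_of_pos (by simp [hc])]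
      simp

-- the whole equivalence, for a fixed keyword list
lemma pv_main (kws : List String) (nodes : List (List (String × String))) :
    (let scored := nodes.foldl (fun acc n =>
        let score : Int := (kws.map (fun kw => if pvHitA n kw then (1 : Int) else 0)).sum
        if score ≠ 0 then acc ++ [(score, n)] else acc) []
     let scored := PySem.List.sorted scored (fun x => x.1) true
     (PySem.List.slice scored none (some 6)).map (fun x => x.2)) =
    (let buckets0 : List (List (List (String × String))) := (List.range (kws.length + 1)).map (fun _ => [])
     let buckets := nodes.foldl (fun b n =>
        let score := pvScoreB kws n
        if score ≠ 0 then b.set score (b.getD score [] ++ [n]) else b) buckets0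
     (PySem.List.pyRange (kws.length : Int) 0 (-1)).foldl (fun out k =>
        (buckets.getD k.toNat []).foldl (fun out n =>
            if out.length = 6 then out else out ++ [n]) out) []) := by
  simp only []
  set K := kws.length with hK
  set ds := (List.range K).map (fun (k : Nat) => (K : Int) - (k : Int)) with hds
  set S := (nodes.filter (fun n => pvScoreB kws n != 0)).map
      (fun n => ((pvScoreB kws n : Int), n)) with hS
  -- A side
  rw [pv_afold, List.nil_append]
  rw [PySem.List.slice_to _ (by norm_num)]
  have hmemS : ∀ p ∈ S, p.1 ∈ ds := by
    intro p hp
    rw [hS] at hp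
    obtain ⟨n, hn, rfl⟩ := List.mem_map.mp hp
    have h0 : pvScoreB kws n ≠ 0 := by simpa using List.of_mem_filter hn
    have hle : pvScoreB kws n ≤ K := by
      simp only [pvScoreB, hK]; exact List.countP_le_length
    rw [hds, pv_mem_down]
    exact ⟨by dsimp only; omega, by dsimp only; omega⟩
  rw [pv_sorted_buckets S ds (hds ▸ pv_pairwise_down K) hmemS]
  -- B side
  have hb0 : ((List.range (K + 1)).map
      (fun _ => ([] : List (List (String × String))))).length = K + 1 := by simp
  obtain ⟨-, hbg⟩ := pv_build_inv kws nodes _ hb0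
  rw [pv_pyRange_down, pv_outer_fold _ _ [] (by simp), List.nil_append]
  -- both are take 6 of a flatMap over ds; identify the bucket bodies
  rw [List.map_take]
  have h6 : (6 : Int).toNat = 6 := rfl
  rw [h6, List.map_flatMap, ← hds]
  congr 1
  refine List.flatMap_congr ?_
  intro j hj
  obtain ⟨h1, h2⟩ := (pv_mem_down K j).mp (hds ▸ hj)
  have hgd0 : ((List.range (K + 1)).map
      (fun _ => ([] : List (List (String × String))))).getD j.toNat [] = [] := by
    rw [List.getD_eq_getElem?_getD, List.getElem?_map]
    cases h : (List.range (K + 1))[j.toNat]? <;> simp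
  rw [hbg j.toNat (by omega) (by omega), hgd0, List.nil_append, hS,
      List.filter_map, List.map_map, List.filter_filter]
  have hpred : ∀ n ∈ nodes,
      ((((fun (p : Int × List (String × String)) => p.1 == j) ∘
          fun n => ((pvScoreB kws n : Int), n)) n) && (pvScoreB kws n != 0)) =
        (pvScoreB kws n == j.toNat) := by
    intro n _
    simp only [Function.comp]
    by_cases h : (pvScoreB kws n : Int) = j
    · have h1' : pvScoreB kws n = j.toNat := by omega
      have h2' : pvScoreB kws n ≠ 0 := by omega
      simp [h1']
      omega
    · have h1' : pvScoreB kws n ≠ j.toNat := by omega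
      have e1 : (((pvScoreB kws n : Int) == j) : Bool) = false := by simp [h]
      have e2 : ((pvScoreB kws n == j.toNat) : Bool) = false := by simp [h1']
      rw [e1, e2, Bool.false_and]
  rw [List.filter_congr hpred]
  exact (List.map_congr_left (fun a _ => rfl)).trans (List.map_id _)

-- ===== VERDICT (by name: the statement is the Claim_ definition above) =====

theorem nodes_for_anomaly_py_spec : Claim_equal_nodes_for_anomaly_py := by
  intro anomaly all_nodes _
  unfold Spec_nodes_for_anomaly_py nodes_for_anomaly_py nodes_for_anomaly_py_alt
  exact pv_main _ all_nodes
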